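-- pv_equiv track=rewrite | github.com/kelvinhuang0327/number-pattern-research | tools/verify_biglotto_3bet_comparison.py | cold_numbers_bet_biglotto
-- ===== SOURCE A (Python) =====
-- from collections import Counter
--
-- def cold_numbers_bet_biglotto(history, window=100, exclude=None):
--     """Cold Numbers for Big Lotto (1-49)"""
--     if exclude is None:
--         exclude = set()
--     recent = history[-window:] if len(history) >= window else history
--     all_nums = [n for d in recent for n in d['numbers']]
--     freq = Counter(all_nums)
--     candidates = [n for n in range(1, 50) if n not in exclude]
--     sorted_cold = sorted(candidates, key=lambda x: freq.get(x, 0))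
--     return sorted(sorted_cold[:6])
-- ===== SOURCE B (Python) =====
-- def cold_numbers_bet_biglotto(history, window=100, exclude=None):
--     """Cold Numbers for Big Lotto (1-49) via frequency buckets instead of a full sort"""
--     if exclude is None:
--         exclude = set()
--     recent = history[-window:] if len(history) >= window else history
--     freq = {}
--     for d in recent:
--         for n in d['numbers']:
--             freq[n] = freq.get(n, 0) + 1
--     buckets = {}
--     for n in range(1, 50):
--         if n not in exclude:
--             buckets.setdefault(freq.get(n, 0), []).append(n)
--     result = []
--     for f in sorted(buckets):
--         result.extend(buckets[f])
--         if len(result) >= 6: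
--             break
--     return sorted(result[:6])
-- ===== Notes on version B (the rewrite author's own statement) =====
-- stated objective: alternative
-- what changed: B replaces A's comparison sort of the 49 candidates by frequency with bucket grouping (a dict mapping frequency to its candidates in ascending number order) emitted in ascending-frequency order with an early break once 6 numbers are collected; the frequency table is built by an explicit dict loop instead of Counter.
import Mathlib
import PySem

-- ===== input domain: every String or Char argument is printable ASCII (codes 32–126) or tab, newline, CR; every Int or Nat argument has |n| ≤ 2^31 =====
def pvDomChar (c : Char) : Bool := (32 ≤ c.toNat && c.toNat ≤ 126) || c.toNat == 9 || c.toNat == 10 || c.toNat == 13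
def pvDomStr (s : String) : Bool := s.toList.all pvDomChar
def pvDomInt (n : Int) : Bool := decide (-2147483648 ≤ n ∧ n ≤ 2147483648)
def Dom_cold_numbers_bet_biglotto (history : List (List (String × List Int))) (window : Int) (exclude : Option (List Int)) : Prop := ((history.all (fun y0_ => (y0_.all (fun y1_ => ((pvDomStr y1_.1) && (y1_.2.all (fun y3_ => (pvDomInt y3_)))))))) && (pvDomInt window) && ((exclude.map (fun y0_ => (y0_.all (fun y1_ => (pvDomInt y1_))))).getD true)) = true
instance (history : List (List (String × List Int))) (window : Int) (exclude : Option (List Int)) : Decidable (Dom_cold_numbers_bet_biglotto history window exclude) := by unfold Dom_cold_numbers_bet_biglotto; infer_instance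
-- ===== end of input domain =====

-- B replaces A's comparison sort of the 49 candidates by frequency with bucket grouping
-- (frequency -> numbers in ascending order) emitted in ascending-frequency order with an
-- early break after 6 numbers; an alternative decomposition of the same cost.

-- shared shape helper: recent = history[-window:] if len(history) >= window else history
def bgRecent (history : List (List (String × List Int))) (window : Int) : List (List (String × List Int)) :=
  if window ≤ (history.length : Int) then PySem.List.slice history (some (-window)) none else history

-- ===== PORT A =====
def cold_numbers_bet_biglotto (history : List (List (String × List Int))) (window : Int) (exclude : Option (List Int)) : List Int :=
  let excl : List Int := match exclude with | none => [] | some l => l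
  let recent := bgRecent history window
  -- d['numbers']: Pre_ guarantees the key is present (Python raises KeyError otherwise)
  let all_nums := recent.flatMap (fun d => (PySem.Dict.mk d).getD "numbers" [])
  let freq := PySem.Dict.counter all_nums
  let candidates := (PySem.List.pyRange 1 50).filter (fun n => !(excl.contains n))
  let sorted_cold := PySem.List.sorted candidates (fun x => freq.getD x 0)
  PySem.List.sorted (PySem.List.slice sorted_cold none (some 6)) (fun x => x)

-- ===== PORT B =====
-- the 'for f in sorted(buckets): result.extend(buckets[f]); if len(result) >= 6: break' loop
def bgCollect (buckets : PySem.Dict Int (List Int)) : List Int → List Int → List Int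
  | [], acc => acc
  | f :: rest, acc =>
      let acc' := acc ++ buckets.getD f []
      if 6 ≤ acc'.length then acc' else bgCollect buckets rest acc'

def cold_numbers_bet_biglotto_alt (history : List (List (String × List Int))) (window : Int) (exclude : Option (List Int)) : List Int :=
  let excl : List Int := match exclude with | none => [] | some l => l
  let recent := bgRecent history window
  -- freq[n] = freq.get(n, 0) + 1 over every n of every recent draw (key presence from Pre_)
  let freq := recent.foldl
    (fun fr d => ((PySem.Dict.mk d).getD "numbers" []).foldl
      (fun fr n => fr.insert n (fr.getD n 0 + 1)) fr) PySem.Dict.empty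
  -- buckets.setdefault(freq.get(n, 0), []).append(n) for the non-excluded n in 1..49
  let buckets := (PySem.List.pyRange 1 50).foldl
    (fun b n => if !(excl.contains n) then b.modify (freq.getD n 0) [] (· ++ [n]) else b)
    PySem.Dict.empty
  let result := bgCollect buckets (PySem.List.sorted buckets.keys (fun x => x)) []
  PySem.List.sorted (PySem.List.slice result none (some 6)) (fun x => x)

-- ===== PRECONDITION & SPEC =====
-- Pre_ excludes exactly the inputs where A raises KeyError: a draw inside the recent window
-- without the key 'numbers'.
def Pre_cold_numbers_bet_biglotto (history : List (List (String × List Int))) (window : Int) (exclude : Option (List Int)) : Prop :=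
  ∀ d ∈ bgRecent history window, (PySem.Dict.mk d).contains "numbers" = true
instance (history : List (List (String × List Int))) (window : Int) (exclude : Option (List Int)) : Decidable (Pre_cold_numbers_bet_biglotto history window exclude) := by unfold Pre_cold_numbers_bet_biglotto; infer_instance
def pvWitness_cold_numbers_bet_biglotto : (List (List (String × List Int))) × Int × Option (List Int) :=
  ([[("numbers", [7, 7, 3])], [("numbers", [3, 12])]], 100, none)

def Spec_cold_numbers_bet_biglotto (history : List (List (String × List Int))) (window : Int) (exclude : Option (List Int)) (out : List Int) : Prop := out = cold_numbers_bet_biglotto_alt history window exclude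
instance (history : List (List (String × List Int))) (window : Int) (exclude : Option (List Int)) (out : List Int) : Decidable (Spec_cold_numbers_bet_biglotto history window exclude out) := by unfold Spec_cold_numbers_bet_biglotto; infer_instance

-- ===== CLAIM (what is proved, stated in full; the proofs are below) =====
def Claim_equal_cold_numbers_bet_biglotto : Prop := ∀ (history : List (List (String × List Int))) (window : Int) (exclude : Option (List Int)), Dom_cold_numbers_bet_biglotto history window exclude → Pre_cold_numbers_bet_biglotto history window exclude → Spec_cold_numbers_bet_biglotto history window exclude (cold_numbers_bet_biglotto history window exclude)

-- ===== LEMMAS AND PROOFS =====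

-- inner frequency loop of B = Counter of the concatenation
lemma bg_counter_foldl (l : List Int) : ∀ (ys : List Int),
    l.foldl (fun fr n => fr.insert n (fr.getD n 0 + 1)) (PySem.Dict.counter ys)
      = PySem.Dict.counter (ys ++ l) := by
  induction l with
  | nil => intro ys; simp
  | cons x l ih =>
    intro ys
    have hstep : (PySem.Dict.counter ys).insert x ((PySem.Dict.counter ys).getD x 0 + 1)
        = PySem.Dict.counter (ys ++ [x]) := by
      rw [PySem.Dict.counter_append_singleton]; rfl
    simp only [List.foldl_cons, hstep]
    rw [ih (ys ++ [x])]
    simp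

-- the nested frequency loop of B = Counter of the flattened numbers (A's freq)
lemma bg_freq_eq (rs : List (List (String × List Int))) : ∀ (ys : List Int),
    rs.foldl
      (fun fr d => ((PySem.Dict.mk d).getD "numbers" []).foldl
        (fun fr n => fr.insert n (fr.getD n 0 + 1)) fr) (PySem.Dict.counter ys)
      = PySem.Dict.counter (ys ++ rs.flatMap (fun d => (PySem.Dict.mk d).getD "numbers" [])) := by
  induction rs with
  | nil => intro ys; simp
  | cons d rs ih =>
    intro ys
    simp only [List.foldl_cons, bg_counter_foldl]
    rw [ih]
    simp

-- Dict.contains asks the key list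
lemma bg_contains_eq_keys_contains {ν : Type} (d : PySem.Dict Int ν) (k : Int) :
    d.contains k = d.keys.contains k := by
  show d.items.any (fun p => p.1 == k) = _
  simp only [PySem.Dict.keys, List.contains_eq_any_beq, List.any_map]
  congr 1
  funext p
  rw [Bool.eq_iff_iff]
  simp only [Function.comp, beq_iff_eq]
  exact eq_comm

-- Dict.modify on keys: an existing key keeps the key list, a new key is appended
lemma bg_keys_modify {ν : Type} (d : PySem.Dict Int ν) (k : Int) (d0 : ν) (f : ν → ν) :
    (d.modify k d0 f).keys = if d.contains k then d.keys else d.keys ++ [k] := by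
  show (d.insert k _).keys = _
  simp only [PySem.Dict.insert]
  split
  · simp only [PySem.Dict.keys, List.map_map]
    apply List.map_congr_left
    intro p _
    simp only [Function.comp]
    split
    · rename_i hp; simp at hp ⊢; omega
    · rfl
  · simp [PySem.Dict.keys]

-- the bucket-building loop: lookup of a frequency f yields the candidates with that frequency
lemma bg_bucket_getD (g : Int → Int) (l : List Int) : ∀ (b : PySem.Dict Int (List Int)) (f : Int),
    (l.foldl (fun b n => b.modify (g n) [] (· ++ [n])) b).getD f []
      = b.getD f [] ++ l.filter (fun n => g n == f) := by
  induction l with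
  | nil => intro b f; simp
  | cons x l ih =>
    intro b f
    simp only [List.foldl_cons, ih, List.filter_cons]
    by_cases h : g x = f
    · subst h
      rw [PySem.Dict.getD_modify_self]
      simp
    · rw [PySem.Dict.getD_modify_of_ne _ _ _ (Ne.symm h)]
      simp [h]

-- the bucket-building loop: the key list collects the distinct frequency values
lemma bg_bucket_keys (g : Int → Int) (l : List Int) : ∀ (b : PySem.Dict Int (List Int)),
    (l.foldl (fun b n => b.modify (g n) [] (· ++ [n])) b).keys
      = l.foldl (fun s n => PySem.Set.add s (g n)) b.keys := by
  induction l with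
  | nil => intro b; rfl
  | cons x l ih =>
    intro b
    simp only [List.foldl_cons, ih]
    congr 1
    rw [bg_keys_modify, bg_contains_eq_keys_contains]
    rfl

-- insertion into a sorted accumulator only compares against the accumulator's elements
lemma bg_insertBy_congr {α : Type} (b1 b2 : α → α → Bool) (x : α) :
    ∀ acc : List α, (∀ y ∈ acc, b1 x y = b2 x y) →
      PySem.List.insertBy b1 x acc = PySem.List.insertBy b2 x acc := by
  intro acc
  induction acc with
  | nil => intro _; rfl
  | cons y ys ih =>
    intro h
    simp only [PySem.List.insertBy]
    rw [h y (by simp)]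
    split
    · rfl
    · rw [ih (fun z hz => h z (by simp [hz]))]

-- insertion sort with two comparators agreeing on (later, earlier) pairs gives the same list
lemma bg_foldl_insertBy_congr {α : Type} (b1 b2 : α → α → Bool) :
    ∀ (xs acc : List α), (∀ x ∈ xs, ∀ y ∈ acc, b1 x y = b2 x y) →
      xs.Pairwise (fun y x => b1 x y = b2 x y) →
      xs.foldl (fun acc x => PySem.List.insertBy b1 x acc) acc
        = xs.foldl (fun acc x => PySem.List.insertBy b2 x acc) acc := by
  intro xs
  induction xs with
  | nil => intros; rfl
  | cons x xs ih =>
    intro acc h hp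
    rw [List.pairwise_cons] at hp
    simp only [List.foldl_cons]
    rw [bg_insertBy_congr b1 b2 x acc (h x (by simp))]
    apply ih
    · intro x' hx' y hy
      rcases (PySem.List.mem_insertBy b2 x y acc).mp hy with rfl | hy
      · exact hp.1 x' hx'
      · exact h x' (by simp [hx']) y hy
    · exact hp.2

-- stability: on an ascending list of numbers 1..49, the stable sort by frequency alone equals
-- the sort by the injective combined key 50*freq + n
lemma bg_sorted_key_eq (g : Int → Int) (cs : List Int)
    (hb : ∀ n ∈ cs, 1 ≤ n ∧ n < 50) (hp : cs.Pairwise (· < ·)) :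
    PySem.List.sorted cs (fun x => g x) = PySem.List.sorted cs (fun x => 50 * g x + x) := by
  rw [PySem.List.sorted_eq_foldl_insertBy, PySem.List.sorted_eq_foldl_insertBy]
  apply bg_foldl_insertBy_congr
  · intro x _ y hy; cases hy
  · apply hp.imp_of_mem
    intro y x hy hx hlt
    have hby := hb y hy
    have hbx := hb x hx
    rw [Bool.eq_iff_iff]
    simp only [decide_eq_true_eq]
    omega

-- the bucketed concatenation IS the sort by the combined key
lemma bg_sorted_eq_flat (g : Int → Int) (cs : List Int)
    (hb : ∀ n ∈ cs, 1 ≤ n ∧ n < 50) (hp : cs.Pairwise (· < ·)) :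
    PySem.List.sorted cs (fun x => 50 * g x + x)
      = (PySem.List.sorted (PySem.Set.ofList (cs.map g)) (fun x => x)).flatMap
          (fun f => cs.filter (fun n => g n == f)) := by
  set fvals := PySem.List.sorted (PySem.Set.ofList (cs.map g)) (fun x => x) with hfv
  have hfp : fvals.Pairwise (· < ·) := PySem.List.sorted_ofList_pairwise_lt _
  have hmemf : ∀ f, f ∈ fvals ↔ f ∈ cs.map g := by
    intro f; rw [hfv, PySem.List.mem_sorted, PySem.Set.mem_ofList]
  have hpair : (fvals.flatMap (fun f => cs.filter (fun n => g n == f))).Pairwise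
      (fun a b => 50 * g a + a < 50 * g b + b) := by
    rw [List.flatMap_def, List.pairwise_flatten]
    constructor
    · intro lf hlf
      rcases List.mem_map.mp hlf with ⟨f, _, rfl⟩
      apply (hp.filter _).imp_of_mem
      intro a b ha hb' hab
      have hga := List.of_mem_filter ha
      have hgb := List.of_mem_filter hb'
      simp only [beq_iff_eq] at hga hgb
      omega
    · rw [List.pairwise_map]
      apply hfp.imp_of_mem
      intro f1 f2 hf1 hf2 hlt x hx y hy
      have hgx := List.of_mem_filter hx
      have hgy := List.of_mem_filter hy
      have hbx := hb x (List.mem_of_mem_filter hx)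
      have hby := hb y (List.mem_of_mem_filter hy)
      simp only [beq_iff_eq] at hgx hgy
      omega
  have hnodup : (fvals.flatMap (fun f => cs.filter (fun n => g n == f))).Nodup :=
    hpair.imp (fun h heq => by subst heq; omega)
  have hmem : ∀ x, x ∈ fvals.flatMap (fun f => cs.filter (fun n => g n == f)) ↔ x ∈ cs := by
    intro x
    rw [List.mem_flatMap]
    constructor
    · rintro ⟨f, _, hx⟩; exact List.mem_of_mem_filter hx
    · intro hx
      exact ⟨g x, (hmemf _).mpr (List.mem_map_of_mem hx), List.mem_filter.mpr ⟨hx, by simp⟩⟩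
  exact PySem.List.sorted_eq_of_perm_of_pairwise_lt cs _ _
    ((List.perm_ext_iff_of_nodup hnodup (hp.imp (fun h => ne_of_lt h))).mpr hmem) hpair

-- the early-broken collection loop agrees with the full concatenation on the first 6 elements
lemma bg_collect_take (buckets : PySem.Dict Int (List Int)) :
    ∀ (ks acc : List Int),
      (bgCollect buckets ks acc).take 6
        = (acc ++ ks.flatMap (fun f => buckets.getD f [])).take 6 := by
  intro ks
  induction ks with
  | nil => intro acc; simp [bgCollect]
  | cons f rest ih =>
    intro acc
    simp only [bgCollect, List.flatMap_cons, ← List.append_assoc]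
    split
    · rename_i h
      rw [List.take_append_of_le_length h]
    · exact ih _

-- ===== VERDICT (by name: the statement is the Claim_ definition above) =====
theorem cold_numbers_bet_biglotto_spec : Claim_equal_cold_numbers_bet_biglotto := by
  intro history window exclude hdom hpre
  clear hdom hpre
  unfold Spec_cold_numbers_bet_biglotto cold_numbers_bet_biglotto cold_numbers_bet_biglotto_alt
  simp only []
  set excl : List Int := (match exclude with | none => [] | some l => l) with hexcl
  set recent := bgRecent history window with hrecent
  set all_nums := recent.flatMap (fun d => (PySem.Dict.mk d).getD "numbers" []) with hall
  set freq := PySem.Dict.counter all_nums with hfreq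
  set cands := (PySem.List.pyRange 1 50).filter (fun n => !(excl.contains n)) with hcands
  -- B's frequency dict is A's Counter
  have hfreqB : recent.foldl
      (fun fr d => ((PySem.Dict.mk d).getD "numbers" []).foldl
        (fun fr n => fr.insert n (fr.getD n 0 + 1)) fr) PySem.Dict.empty = freq := by
    have h0 : (PySem.Dict.empty : PySem.Dict Int Int) = PySem.Dict.counter [] := rfl
    rw [h0, bg_freq_eq]
    simp [hfreq, hall]
  rw [hfreqB]
  -- B's bucket loop is a fold over A's candidate list
  simp only [PySem.List.foldl_if_eq_foldl_filter]
  set g : Int → Int := fun n => freq.getD n 0 with hg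
  set buckets := cands.foldl (fun b n => b.modify (g n) [] (· ++ [n])) PySem.Dict.empty with hbuckets
  have hcb : ∀ n ∈ cands, 1 ≤ n ∧ n < 50 := by
    intro n hn
    have := PySem.List.mem_pyRange_one.mp (List.mem_of_mem_filter hn)
    omega
  have hcp : cands.Pairwise (· < ·) :=
    List.Pairwise.filter _ (by decide : (PySem.List.pyRange 1 50).Pairwise (· < ·))
  have hkeys : buckets.keys = PySem.Set.ofList (cands.map g) := by
    rw [hbuckets, bg_bucket_keys, PySem.Set.ofList_eq_foldl, List.foldl_map]
    rfl
  have hgetD : ∀ f, buckets.getD f [] = cands.filter (fun n => g n == f) := by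
    intro f
    rw [hbuckets, bg_bucket_getD]
    rfl
  have htake : (bgCollect buckets (PySem.List.sorted buckets.keys (fun x => x)) []).take 6
      = (PySem.List.sorted cands (fun x => g x)).take 6 := by
    rw [bg_collect_take, List.nil_append, hkeys]
    simp only [hgetD]
    rw [← bg_sorted_eq_flat g cands hcb hcp, ← bg_sorted_key_eq g cands hcb hcp]
  have hslice : ∀ (xs : List Int), PySem.List.slice xs none (some 6) = xs.take 6 := by
    intro xs
    rw [PySem.List.slice_to xs (by norm_num : (0:Int) ≤ 6)]
    rfl
  rw [hslice, hslice, htake]
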